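-- pv_equiv track=rewrite | github.com/sdyuyouth/Multi-threaded-Web-Crawler-for-Bing | web_crawler.py | course_and_country
-- ===== SOURCE A (Python) =====
-- def course_and_country(start_dict):
--     course_dict = {}
--     for key, value in start_dict.items():
--         country = value['country']
--         if country not in course_dict:
--             course_dict[country] = []
--         course_dict[country].append(key)
--     return course_dict
-- ===== SOURCE B (Python) =====
-- def course_and_country(start_dict):
--     # two-pass: ordered distinct countries first, then one comprehension per country
--     countries = list(dict.fromkeys(v['country'] for v in start_dict.values()))
--     return {c: [k for k, v in start_dict.items() if v['country'] == c] for c in countries}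
-- ===== Notes on version B (the rewrite author's own statement) =====
-- stated objective: alternative
-- what changed: replaces the single-pass mutable bucket-append dict with two passes: an ordered dedup of the country values followed by a dict comprehension that builds each country's key list with its own filtering comprehension
import Mathlib
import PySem

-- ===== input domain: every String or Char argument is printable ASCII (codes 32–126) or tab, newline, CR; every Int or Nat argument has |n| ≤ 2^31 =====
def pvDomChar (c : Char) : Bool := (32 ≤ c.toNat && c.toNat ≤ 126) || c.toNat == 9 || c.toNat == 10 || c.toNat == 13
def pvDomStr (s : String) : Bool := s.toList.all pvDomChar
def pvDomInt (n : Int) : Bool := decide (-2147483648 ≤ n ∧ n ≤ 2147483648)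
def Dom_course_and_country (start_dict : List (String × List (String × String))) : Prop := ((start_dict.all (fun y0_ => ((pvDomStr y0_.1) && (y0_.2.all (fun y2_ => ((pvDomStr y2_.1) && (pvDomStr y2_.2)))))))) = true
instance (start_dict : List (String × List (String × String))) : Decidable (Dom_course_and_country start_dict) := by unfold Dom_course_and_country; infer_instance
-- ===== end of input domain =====

-- B groups keys by country via an ordered dedup of the countries plus one filtering pass per
-- country, instead of A's single-pass bucket-append dict (alternative decomposition, not faster).


-- ===== PORT A =====
-- value['country'] (first match in the inner dict); total form, exact under Pre_ (key present)
def pvCountry (v : List (String × String)) : String :=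
  ((PySem.Dict.mk v).get? "country").getD ""

def course_and_country (start_dict : List (String × List (String × String))) : List (String × List String) :=
  (start_dict.foldl
    (fun course_dict kv =>
      let country := pvCountry kv.2
      let course_dict := if course_dict.contains country then course_dict
                         else course_dict.insert country ([] : List String)
      course_dict.modify country [] (· ++ [kv.1]))
    PySem.Dict.empty).items

-- ===== PORT B =====
def course_and_country_alt (start_dict : List (String × List (String × String))) : List (String × List String) :=
  let countries := PySem.List.dedup (start_dict.map (fun kv => pvCountry kv.2))
  countries.map (fun c => (c, (start_dict.filter (fun kv => pvCountry kv.2 == c)).map (·.1)))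

-- ===== PRECONDITION & SPEC =====
-- Pre_ excludes inputs where some value dict lacks the 'country' key: the Python A raises KeyError there (B raises too).
def Pre_course_and_country (start_dict : List (String × List (String × String))) : Prop :=
  (start_dict.all (fun kv => (PySem.Dict.mk kv.2).contains "country")) = true
instance (start_dict : List (String × List (String × String))) : Decidable (Pre_course_and_country start_dict) := by unfold Pre_course_and_country; infer_instance

def pvWitness_course_and_country : (List (String × List (String × String))) :=
  [("calc", [("country", "US")]), ("alg", [("country", "DE")]), ("geo", [("country", "US")])]

def Spec_course_and_country (start_dict : List (String × List (String × String))) (out : List (String × List String)) : Prop := out = course_and_country_alt start_dict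
instance (start_dict : List (String × List (String × String))) (out : List (String × List String)) : Decidable (Spec_course_and_country start_dict out) := by unfold Spec_course_and_country; infer_instance

-- ===== CLAIM (what is proved, stated in full; the proofs are below) =====
def Claim_equal_course_and_country : Prop := ∀ (start_dict : List (String × List (String × String))), Dom_course_and_country start_dict → Pre_course_and_country start_dict → Spec_course_and_country start_dict (course_and_country start_dict)

-- ===== LEMMAS AND PROOFS =====

-- A's loop body (insert-if-absent, then append) acts on the dict exactly as one Dict.modify
lemma stepA_eq_modify (d : PySem.Dict String (List String)) (c k : String) :
    (if d.contains c then d else d.insert c ([] : List String)).modify c [] (· ++ [k])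
      = d.modify c [] (· ++ [k]) := by
  by_cases hc : d.contains c = true
  · simp [hc]
  · simp only [Bool.not_eq_true] at hc
    simp [hc, PySem.Dict.modify, PySem.Dict.getD_insert_self, PySem.Dict.insert_insert_self,
          PySem.Dict.getD_of_not_contains d [] hc]

-- the two ports agree on every input (the Pre_ only delimits where the Python A returns)
lemma ports_agree (sd : List (String × List (String × String))) :
    course_and_country sd = course_and_country_alt sd := by
  unfold course_and_country course_and_country_alt
  have h1 : (sd.foldl
      (fun course_dict kv =>
        let country := pvCountry kv.2
        let course_dict := if course_dict.contains country then course_dict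
                           else course_dict.insert country ([] : List String)
        course_dict.modify country [] (· ++ [kv.1]))
      PySem.Dict.empty)
      = ((sd.map (fun kv => (pvCountry kv.2, kv.1))).foldl
          (fun d p => d.modify p.1 [] (· ++ [p.2])) PySem.Dict.empty) := by
    rw [List.foldl_map]
    congr 1
    funext d kv
    exact stepA_eq_modify d (pvCountry kv.2) kv.1
  rw [h1]
  set l := sd.map (fun kv => (pvCountry kv.2, kv.1)) with hl
  have hnd : ((l.foldl (fun d p => d.modify p.1 [] (· ++ [p.2])) PySem.Dict.empty)).keys.Nodup :=
    PySem.Dict.nodup_keys_foldl_modify_key l (·.1) [] (fun d p => (· ++ [p.2])) _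
      PySem.Dict.nodup_keys_empty
  rw [PySem.Dict.items_eq_map_keys _ hnd []]
  have hkeys : ((l.foldl (fun d p => d.modify p.1 [] (· ++ [p.2])) PySem.Dict.empty)).keys
      = PySem.List.dedup (sd.map (fun kv => pvCountry kv.2)) := by
    rw [PySem.Dict.keys_foldl_modify_key]
    simp [hl, List.map_map, PySem.Dict.keys_empty]
    rfl
  rw [hkeys]
  apply List.map_congr_left
  intro c hc
  have hg := PySem.Dict.getD_foldl_modify_append l PySem.Dict.empty c
  simp only [PySem.Dict.getD_empty] at hg
  rw [hg]
  simp [hl, List.filter_map, List.map_map, Function.comp_def]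

-- ===== VERDICT (by name: the statement is the Claim_ definition above) =====
theorem course_and_country_spec : Claim_equal_course_and_country := by
  intro sd _ _
  unfold Spec_course_and_country
  exact ports_agree sd
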